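-- pv_equiv track=rewrite | github.com/CallieSardina/Simulation | initialize2DArray.py | initialize2DArray
-- ===== SOURCE A (Python) =====
-- def initialize2DArray(inGroup, outGroup, n):
--     frac = int(n/3)
--     matrix = [[] for i in range(n)]
--     for i in range(n):
--         for j in range(n):
--             if(i <= frac and j <= frac):
--                 matrix[i].append(inGroup)
--             else:
--                 if(frac < i <= (frac * 2) and frac < j <= (frac * 2)):
--                     matrix[i].append(inGroup)
--                 else:
--                     if((frac * 2) < i <= (n - 1) and (frac * 2) < j <= (n - 1)):
--                         matrix[i].append(inGroup)
--                     else: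
--                         matrix[i].append(outGroup)
--     return matrix
-- ===== SOURCE B (Python) =====
-- def initialize2DArray(inGroup, outGroup, n):
--     if n <= 0:
--         return []
--     frac = int(n / 3)
--     sizes = [frac + 1, frac, n - 2 * frac - 1]
--     matrix = []
--     for bi, szi in enumerate(sizes):
--         row = []
--         for bj, szj in enumerate(sizes):
--             row += [inGroup if bi == bj else outGroup] * szj
--         matrix += [list(row) for _ in range(szi)]
--     return matrix
-- ===== Notes on version B (the rewrite author's own statement) =====
-- stated objective: alternative
-- what changed: B builds the three block sizes once, constructs one template row per block by concatenating replicated segments, and assembles the matrix by replicating each template row, instead of A's per-cell nested loops with three coordinated range-check branches.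
import Mathlib
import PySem

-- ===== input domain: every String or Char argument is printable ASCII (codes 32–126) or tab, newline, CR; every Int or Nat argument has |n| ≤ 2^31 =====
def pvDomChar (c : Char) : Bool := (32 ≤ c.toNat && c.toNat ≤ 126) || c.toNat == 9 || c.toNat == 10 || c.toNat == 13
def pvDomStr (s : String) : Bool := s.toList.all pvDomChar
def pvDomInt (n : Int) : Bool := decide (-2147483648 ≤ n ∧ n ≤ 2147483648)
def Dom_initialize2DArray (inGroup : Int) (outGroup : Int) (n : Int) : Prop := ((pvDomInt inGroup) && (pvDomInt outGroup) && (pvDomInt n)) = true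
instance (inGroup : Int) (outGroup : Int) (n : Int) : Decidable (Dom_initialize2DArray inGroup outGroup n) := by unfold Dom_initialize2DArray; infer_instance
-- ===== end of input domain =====

-- B builds three block sizes once, one template row per block from replicated segments, and
-- replicates each template row, instead of A's per-cell nested loops with range-check branches
-- (objective: alternative decomposition, same O(n^2) cost).


-- ===== PORT A =====
-- int(n/3) truncates toward zero; exact here since |n| ≤ 2^31 keeps the float n/3 within
-- 2^-22 of n/3, which cannot cross an integer boundary.
def initialize2DArray (inGroup : Int) (outGroup : Int) (n : Int) : List (List Int) :=
  let frac := n.tdiv 3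
  (PySem.List.pyRange 0 n 1).map (fun i =>
    (PySem.List.pyRange 0 n 1).foldl (fun row j =>
      row ++ [if i ≤ frac ∧ j ≤ frac then inGroup
              else if frac < i ∧ i ≤ frac * 2 ∧ frac < j ∧ j ≤ frac * 2 then inGroup
              else if frac * 2 < i ∧ i ≤ n - 1 ∧ frac * 2 < j ∧ j ≤ n - 1 then inGroup
              else outGroup]) [])

-- ===== PORT B =====
-- int(n/3) ported as in Port A (exact on the domain).  '[x] * k' is List.replicate k.toNat x
-- (Python's repeat yields [] for k < 0, as toNat does); list(row) copies, which is the identity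
-- on the returned value.
def initialize2DArray_alt (inGroup : Int) (outGroup : Int) (n : Int) : List (List Int) :=
  if n ≤ 0 then [] else
  let frac := n.tdiv 3
  let sizes : List Int := [frac + 1, frac, n - 2 * frac - 1]
  (PySem.List.enumerate sizes 0).foldl (fun matrix bs =>
    let row := (PySem.List.enumerate sizes 0).foldl (fun row cs =>
      row ++ List.replicate cs.2.toNat (if bs.1 = cs.1 then inGroup else outGroup)) []
    matrix ++ List.replicate bs.2.toNat row) []

-- ===== PRECONDITION & SPEC =====
def Spec_initialize2DArray (inGroup : Int) (outGroup : Int) (n : Int) (out : List (List Int)) : Prop := out = initialize2DArray_alt inGroup outGroup n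
instance (inGroup : Int) (outGroup : Int) (n : Int) (out : List (List Int)) : Decidable (Spec_initialize2DArray inGroup outGroup n out) := by unfold Spec_initialize2DArray; infer_instance

-- ===== CLAIM =====
def Claim_equal_initialize2DArray : Prop := ∀ (inGroup : Int) (outGroup : Int) (n : Int), Dom_initialize2DArray inGroup outGroup n → Spec_initialize2DArray inGroup outGroup n (initialize2DArray inGroup outGroup n)

-- ===== LEMMAS AND PROOFS =====

-- block label of index k (proof-only)
def pvLab (frac k : Int) : Int := if k ≤ frac then 0 else if k ≤ 2 * frac then 1 else 2

-- canonical form both ports are reduced to (proof-only)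
def pvCanon (inGroup outGroup n : Int) : List (List Int) :=
  let frac := n.tdiv 3
  (PySem.List.pyRange 0 n 1).map (fun i =>
    (PySem.List.pyRange 0 n 1).map (fun j =>
      if pvLab frac i = pvLab frac j then inGroup else outGroup))

theorem foldl_append_singleton {α β : Type} (f : α → β) (l : List α) (init : List β) :
    l.foldl (fun row j => row ++ [f j]) init = init ++ l.map f := by
  induction l generalizing init with
  | nil => simp
  | cons x xs ih => simp [List.foldl, ih, List.append_assoc]

theorem map_const_of_mem {α β : Type} (f : α → β) (c : β) (l : List α)
    (h : ∀ x ∈ l, f x = c) : l.map f = List.replicate l.length c := by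
  induction l with
  | nil => simp
  | cons x xs ih =>
    simp only [List.map, List.length_cons, List.replicate_succ]
    exact by rw [h x (by simp), ih (fun y hy => h y (by simp [hy]))]

theorem pvA_eq_canon (inGroup outGroup n : Int) :
    initialize2DArray inGroup outGroup n = pvCanon inGroup outGroup n := by
  unfold initialize2DArray pvCanon
  simp only [foldl_append_singleton, List.nil_append]
  apply List.map_congr_left
  intro i hi
  apply List.map_congr_left
  intro j hj
  rw [PySem.List.mem_pyRange_one] at hi hj
  have htd : n.tdiv 3 = n / 3 := Int.tdiv_eq_ediv_of_nonneg (by omega)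
  rw [htd]
  simp only [pvLab]
  split_ifs <;> first | rfl | omega

theorem pvB_eq_canon (inGroup outGroup n : Int) :
    initialize2DArray_alt inGroup outGroup n = pvCanon inGroup outGroup n := by
  unfold initialize2DArray_alt pvCanon
  by_cases hn : n ≤ 0
  · simp [hn, PySem.List.pyRange_one_eq_nil hn]
  · simp only [if_neg hn]
    rw [not_le] at hn
    have htd : n.tdiv 3 = n / 3 := Int.tdiv_eq_ediv_of_nonneg (by omega)
    rw [htd]
    set frac := n / 3 with hfrac
    have h0 : (0 : Int) ≤ frac := by omega
    have h1 : frac + 1 ≤ 2 * frac + 1 := by omega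
    have h2 : 2 * frac + 1 ≤ n := by omega
    -- split the index range into the three blocks
    rw [PySem.List.pyRange_one_append 0 (frac + 1) n (by omega) (by omega),
        PySem.List.pyRange_one_append (frac + 1) (2 * frac + 1) n h1 h2]
    simp only [PySem.List.enumerate_cons, PySem.List.enumerate_nil, List.foldl,
      List.nil_append, List.map_append]
    -- equate each block of rows with a replicated template row
    have hlen1 : (PySem.List.pyRange 0 (frac + 1) 1).length = (frac + 1).toNat := by
      rw [PySem.List.length_pyRange_one]; congr 1; omega
    have hlen2 : (PySem.List.pyRange (frac + 1) (2 * frac + 1) 1).length = frac.toNat := by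
      rw [PySem.List.length_pyRange_one]; congr 1; omega
    have hlen3 : (PySem.List.pyRange (2 * frac + 1) n 1).length = (n - 2 * frac - 1).toNat := by
      rw [PySem.List.length_pyRange_one]; congr 1; omega
    have hrow : ∀ v : Int,
        (fun j => if v = pvLab frac j then inGroup else outGroup) <$> PySem.List.pyRange 0 (frac+1) 1 ++
          ((fun j => if v = pvLab frac j then inGroup else outGroup) <$> PySem.List.pyRange (frac+1) (2*frac+1) 1 ++
           (fun j => if v = pvLab frac j then inGroup else outGroup) <$> PySem.List.pyRange (2*frac+1) n 1) =
        List.replicate (frac + 1).toNat (if v = 0 then inGroup else outGroup) ++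
          (List.replicate frac.toNat (if v = 1 then inGroup else outGroup) ++
           List.replicate (n - 2 * frac - 1).toNat (if v = 2 then inGroup else outGroup)) := by
      intro v
      congr 1
      · rw [← hlen1]
        apply map_const_of_mem
        intro x hx; rw [PySem.List.mem_pyRange_one] at hx
        have : pvLab frac x = 0 := by simp only [pvLab]; split_ifs <;> omega
        rw [this]
      congr 1
      · rw [← hlen2]
        apply map_const_of_mem
        intro x hx; rw [PySem.List.mem_pyRange_one] at hx
        have : pvLab frac x = 1 := by simp only [pvLab]; split_ifs <;> omega
        rw [this]
      · rw [← hlen3]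
        apply map_const_of_mem
        intro x hx; rw [PySem.List.mem_pyRange_one] at hx
        have : pvLab frac x = 2 := by simp only [pvLab]; split_ifs <;> omega
        rw [this]
    simp only [List.append_assoc]
    simp only [reduceIte]
    symm
    rw [← hlen1, ← hlen2, ← hlen3]
    congr 1
    · apply map_const_of_mem
      intro x hx; rw [PySem.List.mem_pyRange_one] at hx
      have hv : pvLab frac x = 0 := by simp only [pvLab]; split_ifs <;> omega
      rw [hv]
      simpa only [reduceIte, ← hlen1, ← hlen2, ← hlen3] using hrow 0
    congr 1
    · apply map_const_of_mem
      intro x hx; rw [PySem.List.mem_pyRange_one] at hx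
      have hv : pvLab frac x = 1 := by simp only [pvLab]; split_ifs <;> omega
      rw [hv]
      simpa only [reduceIte, ← hlen1, ← hlen2, ← hlen3] using hrow 1
    · apply map_const_of_mem
      intro x hx; rw [PySem.List.mem_pyRange_one] at hx
      have hv : pvLab frac x = 2 := by simp only [pvLab]; split_ifs <;> omega
      rw [hv]
      simpa only [reduceIte, ← hlen1, ← hlen2, ← hlen3] using hrow 2

-- ===== VERDICT =====
theorem initialize2DArray_spec : Claim_equal_initialize2DArray := by
  intro inGroup outGroup n _
  unfold Spec_initialize2DArray
  rw [pvA_eq_canon, pvB_eq_canon]
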